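-- pv_equiv track=rewrite | github.com/Egorrr1613/lambdaBrain | 28_task/26.py | white_walkers
-- ===== SOURCE A (Python) =====
-- def white_walkers(village: str) -> bool:
--     if len(village) < 5:
--         return False
--     int_indexes = [(k, int(v)) for k, v in enumerate(village) if v.isdigit()]
--     len_indexes = len(int_indexes)
--
--     if not len_indexes:
--         return False
--
--     pair_int_sum_ten: set[tuple[int, int]] = set()
--     find_pair_ten(int_indexes, len_indexes - 1, pair_int_sum_ten)
--
--     if not pair_int_sum_ten:
--         return False
--
--     for start, end in pair_int_sum_ten:
--         sl_village = village[start : end + 1]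
--         if find_equal_count(sl_village, len(sl_village), 0) != 3:
--             return False
--
--     return True
--
-- def find_pair_ten(
--     input_l: list[tuple[int, int]], index: int, result: set[tuple[int, int]]
-- ) -> None:
--     if index == 0:
--         return
--     if input_l[index][1] + input_l[index - 1][1] == 10:
--         result.add((input_l[index - 1][0], input_l[index][0]))
--     find_pair_ten(input_l, index - 1, result)
--
-- def find_equal_count(s: str, n: int, i: int) -> int:
--     if i == n:
--         return 0
--     return int(s[i] == "=") + find_equal_count(s, n, i + 1)
-- ===== SOURCE B (Python) =====
-- def white_walkers(village: str) -> bool: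
--     if len(village) < 5:
--         return False
--     eq = 0            # number of '=' seen so far
--     prev = None       # (value, eq-count when seen) of the last digit
--     found = False     # some adjacent digit pair summed to 10
--     ok = True         # every such pair's span held exactly three '='
--     for ch in village:
--         if ch == "=":
--             eq += 1
--         elif ch.isdigit():
--             d = int(ch)
--             if prev is not None and prev[0] + d == 10:
--                 found = True
--                 if eq - prev[1] != 3:
--                     ok = False
--             prev = (d, eq)
--     return found and ok
-- ===== Notes on version B (the rewrite author's own statement) =====
-- stated objective: faster
-- what changed: Replaced A's recursive scan that collects digit-pair index spans into a set plus a recursive equals-sign count of each span's substring by one linear pass over the string that keeps a running equals-sign count, the previous digit with its count, and checks each adjacent digit pair summing to 10 on the fly.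
import Mathlib
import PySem

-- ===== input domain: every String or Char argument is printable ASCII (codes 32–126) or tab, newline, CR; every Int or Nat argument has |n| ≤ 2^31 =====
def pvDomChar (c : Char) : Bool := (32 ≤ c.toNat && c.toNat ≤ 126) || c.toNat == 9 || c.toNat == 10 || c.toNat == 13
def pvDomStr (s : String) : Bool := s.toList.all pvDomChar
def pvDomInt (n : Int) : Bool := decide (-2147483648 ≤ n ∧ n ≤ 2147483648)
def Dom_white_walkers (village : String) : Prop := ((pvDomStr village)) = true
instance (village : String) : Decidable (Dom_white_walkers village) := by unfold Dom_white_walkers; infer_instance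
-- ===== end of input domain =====

-- B replaces A's recursive pair search over an index list plus a recursive equals-sign count of
-- every pair's substring by one linear pass keeping a running count — objective: faster (asymptotic).

-- int(v) for a one-character digit string (both Pythons apply int() only to digit characters)
def pvIntChar (c : Char) : Int := (PySem.Int.ofChars? [c]).getD 0

-- ===== PORT A =====
-- find_pair_ten; Python indexes input_l[index] / input_l[index-1], always in range as called
-- (index starts at len-1 and decreases to 0), so List.getD is exact here.
def pvFindPairTen (l : List (Int × Int)) : Nat → PySem.Set (Int × Int) → PySem.Set (Int × Int)
  | 0, result => result
  | (i+1), result =>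
      let result' :=
        if (l.getD (i+1) (0, 0)).2 + (l.getD i (0, 0)).2 == 10 then
          PySem.Set.add result ((l.getD i (0, 0)).1, (l.getD (i+1) (0, 0)).1)
        else result
      pvFindPairTen l i result'

-- find_equal_count; s[i] is always in range as called (i < n = len(s)), so List.getD is exact.
def pvFindEqualCount (s : List Char) (n : Nat) (i : Nat) : Int :=
  if i = n then 0
  else if n < i then 0  -- totality guard only; never reached as called (i ≤ n throughout)
  else (if s.getD i ' ' == '=' then 1 else 0) + pvFindEqualCount s n (i + 1)
termination_by n - i
decreasing_by omega

def white_walkers (village : String) : Bool :=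
  let cs := village.toList
  if cs.length < 5 then false
  else
    let intIndexes :=
      ((PySem.List.enumerate cs 0).filter (fun kv => PySem.Chars.strIsdigit [kv.2])).map
        (fun kv => (kv.1, pvIntChar kv.2))
    let lenIndexes := intIndexes.length
    if lenIndexes = 0 then false
    else
      let pairSet := pvFindPairTen intIndexes (lenIndexes - 1) PySem.Set.empty
      if pairSet.isEmpty then false
      else
        -- 'for start, end in set: if … != 3: return False' then 'return True' — an all over the
        -- set's elements (order-independent, so the set's iteration order does not matter)
        pairSet.all (fun se =>
          let sl := PySem.List.slice cs (some se.1) (some (se.2 + 1))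
          pvFindEqualCount sl sl.length 0 == 3)

-- ===== PORT B =====
-- state: (eq, prev, found, ok) exactly as in Source B's single loop
def pvStepB (st : Int × Option (Int × Int) × Bool × Bool) (ch : Char) :
    Int × Option (Int × Int) × Bool × Bool :=
  if ch == '=' then (st.1 + 1, st.2.1, st.2.2.1, st.2.2.2)
  else if PySem.Chars.strIsdigit [ch] then
    let d := pvIntChar ch
    match st.2.1 with
    | some prev =>
        if prev.1 + d == 10 then
          (st.1, some (d, st.1), true, if !(st.1 - prev.2 == 3) then false else st.2.2.2)
        else (st.1, some (d, st.1), st.2.2.1, st.2.2.2)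
    | none => (st.1, some (d, st.1), st.2.2.1, st.2.2.2)
  else st

def white_walkers_alt (village : String) : Bool :=
  let cs := village.toList
  if cs.length < 5 then false
  else
    let st := cs.foldl pvStepB (0, none, false, true)
    st.2.2.1 && st.2.2.2

-- ===== PRECONDITION & SPEC =====
def Spec_white_walkers (village : String) (out : Bool) : Prop := out = white_walkers_alt village
instance (village : String) (out : Bool) : Decidable (Spec_white_walkers village out) := by unfold Spec_white_walkers; infer_instance

-- ===== CLAIM (what is proved, stated in full; the proofs are below) =====
def Claim_equal_white_walkers : Prop := ∀ (village : String), Dom_white_walkers village → Spec_white_walkers village (white_walkers village)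

-- ===== LEMMAS AND PROOFS =====

-- shared intermediate view: the digits of cs as (position, value, number of '=' before them)
def pvDigsI : List Char → Nat → Int → List (Nat × Int × Int)
  | [], _, _ => []
  | c :: t, i, e =>
      if c == '=' then pvDigsI t (i + 1) (e + 1)
      else if PySem.Chars.strIsdigit [c] then (i, pvIntChar c, e) :: pvDigsI t (i + 1) e
      else pvDigsI t (i + 1) e

def pvAdj {α : Type} (l : List α) : List (α × α) := l.zip l.tail

def pvCnt (t : List Char) : Int := (t.countP (· == '=') : Int)

def pvHasTen (L : List (Int × Int)) : Bool := (pvAdj L).any (fun p => p.1.1 + p.2.1 == 10)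

def pvAllOk (L : List (Int × Int)) : Bool :=
  (pvAdj L).all (fun p => !(p.1.1 + p.2.1 == 10) || (p.2.2 - p.1.2 == 3))

def pvDV (t : List Char) (e : Int) : List (Int × Int) := (pvDigsI t 0 e).map (·.2)

lemma pvDigsI_shift (t : List Char) (j : Nat) (i : Nat) (e : Int) :
    pvDigsI t (i + j) e = (pvDigsI t i e).map (fun x => (x.1 + j, x.2)) := by
  induction t generalizing i e with
  | nil => simp [pvDigsI]
  | cons c t ih =>
      simp only [pvDigsI]
      split_ifs with h1 h2
      · have h : i + j + 1 = (i + 1) + j := by omega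
        rw [h, ih]
      · have h : i + j + 1 = (i + 1) + j := by omega
        rw [h, ih]; simp
      · have h : i + j + 1 = (i + 1) + j := by omega
        rw [h, ih]

lemma pvDV_cons (c : Char) (t : List Char) (e : Int) :
    pvDV (c :: t) e =
      if c == '=' then pvDV t (e + 1)
      else if PySem.Chars.strIsdigit [c] then (pvIntChar c, e) :: pvDV t e
      else pvDV t e := by
  have h1 : ∀ e', (pvDigsI t (0 + 1) e').map (fun x => x.2) = pvDV t e' := by
    intro e'; rw [pvDigsI_shift]; simp [pvDV]
  simp only [pvDV, pvDigsI]
  split_ifs with h2 h3 <;> simp only [List.map_cons, h1, pvDV]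

lemma pvFoldB (t : List Char) : ∀ (e : Int) (po : Option (Int × Int)) (f k : Bool),
    t.foldl pvStepB (e, po, f, k) =
      (e + pvCnt t,
       (po.toList ++ pvDV t e).getLast?,
       f || pvHasTen (po.toList ++ pvDV t e),
       k && pvAllOk (po.toList ++ pvDV t e)) := by
  induction t with
  | nil =>
      intro e po f k
      cases po <;> simp [pvCnt, pvDV, pvDigsI, pvHasTen, pvAllOk, pvAdj]
  | cons c t ih =>
      intro e po f k
      rw [List.foldl_cons]
      by_cases hc : c = '='
      · subst hc
        have hDV : pvDV ('=' :: t) e = pvDV t (e + 1) := by rw [pvDV_cons]; simp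
        have hstep : pvStepB (e, po, f, k) '=' = (e + 1, po, f, k) := by
          simp [pvStepB]
        have harith : e + 1 + pvCnt t = e + pvCnt ('=' :: t) := by
          simp only [pvCnt, List.countP_cons, beq_self_eq_true, if_true]
          omega
        rw [hstep, ih, hDV, harith]
      · have hc' : (c == '=') = false := by simp [hc]
        have hcnt : pvCnt (c :: t) = pvCnt t := by
          simp [pvCnt, List.countP_cons, hc']
        by_cases hdig : PySem.Chars.strIsdigit [c] = true
        · have hDV : pvDV (c :: t) e = (pvIntChar c, e) :: pvDV t e := by
            rw [pvDV_cons]; simp [hc', hdig]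
          cases po with
          | none =>
              have hstep : pvStepB (e, none, f, k) c = (e, some (pvIntChar c, e), f, k) := by
                simp only [pvStepB, hc', Bool.false_eq_true, if_false, hdig, if_true]
              rw [hstep, ih, hDV, hcnt]
              simp
          | some pr =>
              by_cases hten : pr.1 + pvIntChar c = 10
              · have hten' : (pr.1 + pvIntChar c == 10) = true := by simp [hten]
                have hstep : pvStepB (e, some pr, f, k) c =
                    (e, some (pvIntChar c, e), true, if !(e - pr.2 == 3) then false else k) := by
                  simp only [pvStepB, hc', Bool.false_eq_true, if_false, hdig, if_true, hten']
                rw [hstep, ih, hDV, hcnt]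
                simp only [Option.toList_some, List.singleton_append, Prod.mk.injEq,
                  List.getLast?_cons_cons, true_and]
                refine ⟨?_, ?_⟩
                · simp [pvHasTen, pvAdj, hten']
                · simp only [pvAllOk, pvAdj, List.tail_cons, List.zip_cons_cons, List.all_cons,
                    hten', Bool.not_true, Bool.false_or]
                  by_cases h3 : e - pr.2 = 3
                  · simp [h3]
                  · have h3' : (e - pr.2 == 3) = false := by simp [h3]
                    simp [h3']
              · have hten' : (pr.1 + pvIntChar c == 10) = false := by simp [hten]
                have hstep : pvStepB (e, some pr, f, k) c =
                    (e, some (pvIntChar c, e), f, k) := by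
                  simp only [pvStepB, hc', Bool.false_eq_true, if_false, hdig, if_true, hten']
                rw [hstep, ih, hDV, hcnt]
                simp only [Option.toList_some, List.singleton_append, Prod.mk.injEq,
                  List.getLast?_cons_cons, true_and]
                refine ⟨?_, ?_⟩
                · simp [pvHasTen, pvAdj, hten']
                · simp [pvAllOk, pvAdj, hten']
        · have hdig' : PySem.Chars.strIsdigit [c] = false := by simpa using hdig
          have hDV : pvDV (c :: t) e = pvDV t e := by
            rw [pvDV_cons]; simp [hc', hdig']
          have hstep : pvStepB (e, po, f, k) c = (e, po, f, k) := by
            simp only [pvStepB, hc', Bool.false_eq_true, if_false, hdig', ite_self]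
          rw [hstep, ih, hDV, hcnt]

lemma pvB_char (village : String) :
    white_walkers_alt village =
      if village.toList.length < 5 then false
      else pvHasTen (pvDV village.toList 0) && pvAllOk (pvDV village.toList 0) := by
  unfold white_walkers_alt
  by_cases h5 : village.toList.length < 5
  · simp only [if_pos h5]
  · simp only [if_neg h5]
    rw [pvFoldB]
    simp

-- ---- A side ----

lemma pvIntIndexes (cs : List Char) : ∀ (i0 : Nat) (e : Int),
    ((PySem.List.enumerate cs (i0 : Int)).filter (fun kv => PySem.Chars.strIsdigit [kv.2])).map
        (fun kv => (kv.1, pvIntChar kv.2)) =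
      (pvDigsI cs i0 e).map (fun x => ((x.1 : Int), x.2.1)) := by
  induction cs with
  | nil => intro i0 e; simp [PySem.List.enumerate_nil, pvDigsI]
  | cons c t ih =>
      intro i0 e
      rw [PySem.List.enumerate_cons]
      have hcast : (i0 : Int) + 1 = ((i0 + 1 : Nat) : Int) := by push_cast; ring
      simp only [pvDigsI, List.filter_cons]
      by_cases hdig : PySem.Chars.strIsdigit [c] = true
      · have hne : (c == '=') = false := by
          by_cases h : c = '='
          · exfalso; rw [h] at hdig; exact absurd hdig (by decide)
          · simp [h]
        simp only [hdig, if_true, hne, Bool.false_eq_true, if_false, List.map_cons, hcast]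
        rw [ih (i0+1) e]
      · have hdig' : PySem.Chars.strIsdigit [c] = false := by simpa using hdig
        simp only [hdig', Bool.false_eq_true, if_false, hcast]
        split_ifs with h
        · exact ih (i0+1) (e+1)
        · exact ih (i0+1) e

lemma pvMemFindPairTen (l : List (Int × Int)) : ∀ (n : Nat) (r : PySem.Set (Int × Int)) (x : Int × Int),
    x ∈ pvFindPairTen l n r ↔
      x ∈ r ∨ ∃ k, k < n ∧ (l.getD (k+1) (0,0)).2 + (l.getD k (0,0)).2 = 10 ∧
        x = ((l.getD k (0,0)).1, (l.getD (k+1) (0,0)).1) := by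
  intro n
  induction n with
  | zero => intro r x; simp [pvFindPairTen]
  | succ n ih =>
      intro r x
      rw [pvFindPairTen, ih]
      by_cases hten : (l.getD (n+1) (0,0)).2 + (l.getD n (0,0)).2 = 10
      · have hten' : ((l.getD (n+1) (0,0)).2 + (l.getD n (0,0)).2 == 10) = true := by
          simpa using hten
        simp only [hten', if_true, PySem.Set.mem_add]
        constructor
        · rintro ((hr | hx) | ⟨k, hk, hsum, hx⟩)
          · exact Or.inl hr
          · exact Or.inr ⟨n, by omega, hten, hx⟩
          · exact Or.inr ⟨k, by omega, hsum, hx⟩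
        · rintro (hr | ⟨k, hk, hsum, hx⟩)
          · exact Or.inl (Or.inl hr)
          · by_cases hkn : k = n
            · subst hkn; exact Or.inl (Or.inr hx)
            · exact Or.inr ⟨k, by omega, hsum, hx⟩
      · have hten' : ((l.getD (n+1) (0,0)).2 + (l.getD n (0,0)).2 == 10) = false := by
          simpa using hten
        simp only [hten', Bool.false_eq_true, if_false]
        constructor
        · rintro (hr | ⟨k, hk, hsum, hx⟩)
          · exact Or.inl hr
          · exact Or.inr ⟨k, by omega, hsum, hx⟩
        · rintro (hr | ⟨k, hk, hsum, hx⟩)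
          · exact Or.inl hr
          · by_cases hkn : k = n
            · subst hkn; exact absurd hsum hten
            · exact Or.inr ⟨k, by omega, hsum, hx⟩

lemma pvFindEqualCount_eq (s : List Char) : ∀ (i : Nat), i ≤ s.length →
    pvFindEqualCount s s.length i = (((s.drop i).countP (· == '=') : Nat) : Int) := by
  have key : ∀ (d i : Nat), s.length - i = d → i ≤ s.length →
      pvFindEqualCount s s.length i = (((s.drop i).countP (· == '=') : Nat) : Int) := by
    intro d
    induction d with
    | zero =>
        intro i h1 h2
        have : i = s.length := by omega
        subst this
        rw [pvFindEqualCount]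
        simp
    | succ d ihd =>
        intro i h1 h2
        have hi : i < s.length := by omega
        rw [pvFindEqualCount, if_neg (by omega), if_neg (by omega),
          ihd (i+1) (by omega) (by omega)]
        rw [List.drop_eq_getElem_cons hi, List.countP_cons,
          List.getD_eq_getElem s ' ' hi]
        by_cases heq : s[i] = '='
        · simp [heq]; omega
        · have : (s[i] == '=') = false := by simp [heq]
          simp [this]
  intro i h
  exact key (s.length - i) i rfl h

lemma pvDigsI_mem (cs : List Char) : ∀ (i0 : Nat) (e0 : Int) (x : Nat × Int × Int),
    x ∈ pvDigsI cs i0 e0 →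
    i0 ≤ x.1 ∧ x.1 < i0 + cs.length ∧
    x.2.2 = e0 + pvCnt (cs.take (x.1 - i0)) ∧
    ∃ c, cs[x.1 - i0]? = some c ∧ PySem.Chars.strIsdigit [c] = true := by
  induction cs with
  | nil => intro i0 e0 x hx; simp [pvDigsI] at hx
  | cons c t ih =>
      intro i0 e0 x hx
      rw [pvDigsI] at hx
      by_cases hc : c = '='
      · subst hc
        rw [if_pos (by simp)] at hx
        obtain ⟨ha, hb, hcnt, c', hget, hdig⟩ := ih (i0+1) (e0+1) x hx
        have hk : x.1 - i0 = (x.1 - (i0+1)) + 1 := by omega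
        refine ⟨by omega, by simp; omega, ?_, ⟨c', ?_, hdig⟩⟩
        · rw [hk, List.take_succ_cons, hcnt]
          simp [pvCnt, List.countP_cons]
          ring
        · rw [hk]; simpa using hget
      · have hc' : (c == '=') = false := by simp [hc]
        rw [if_neg (by simp [hc])] at hx
        by_cases hdig : PySem.Chars.strIsdigit [c] = true
        · rw [if_pos hdig] at hx
          rcases List.mem_cons.mp hx with hx | hx
          · subst hx
            refine ⟨le_refl _, by simp, ?_, ⟨c, by simp, hdig⟩⟩
            simp [pvCnt]
          · obtain ⟨ha, hb, hcnt, c', hget, hdig'⟩ := ih (i0+1) e0 x hx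
            have hk : x.1 - i0 = (x.1 - (i0+1)) + 1 := by omega
            refine ⟨by omega, by simp; omega, ?_, ⟨c', ?_, hdig'⟩⟩
            · rw [hk, List.take_succ_cons, hcnt]
              simp [pvCnt, List.countP_cons, hc']
            · rw [hk]; simpa using hget
        · rw [if_neg hdig] at hx
          obtain ⟨ha, hb, hcnt, c', hget, hdig'⟩ := ih (i0+1) e0 x hx
          have hk : x.1 - i0 = (x.1 - (i0+1)) + 1 := by omega
          refine ⟨by omega, by simp; omega, ?_, ⟨c', ?_, hdig'⟩⟩
          · rw [hk, List.take_succ_cons, hcnt]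
            simp [pvCnt, List.countP_cons, hc']
          · rw [hk]; simpa using hget

lemma pvDigsI_pairwise (cs : List Char) : ∀ (i0 : Nat) (e0 : Int),
    (pvDigsI cs i0 e0).Pairwise (fun a b => a.1 < b.1) := by
  induction cs with
  | nil => intro i0 e0; simp [pvDigsI]
  | cons c t ih =>
      intro i0 e0
      rw [pvDigsI]
      split_ifs with h1 h2
      · exact ih (i0+1) (e0+1)
      · refine List.Pairwise.cons ?_ (ih (i0+1) e0)
        intro y hy
        have := (pvDigsI_mem t (i0+1) e0 y hy).1
        omega
      · exact ih (i0+1) e0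

lemma pvAdj_of_pairwise {α : Type} {R : α → α → Prop} : ∀ {l : List α}, l.Pairwise R →
    ∀ {p : α × α}, p ∈ pvAdj l → R p.1 p.2 := by
  intro l
  induction l with
  | nil => intro _ p hp; simp [pvAdj] at hp
  | cons x t ih =>
      intro h p hp
      cases t with
      | nil => simp [pvAdj] at hp
      | cons y t' =>
          rw [pvAdj, List.tail_cons, List.zip_cons_cons] at hp
          rcases List.mem_cons.mp hp with hp | hp
          · subst hp
            exact (List.pairwise_cons.mp h).1 y (by simp)
          · exact ih (List.pairwise_cons.mp h).2 hp

lemma pvAdj_map {α β : Type} (f : α → β) (l : List α) :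
    pvAdj (l.map f) = (pvAdj l).map (fun q => (f q.1, f q.2)) := by
  simp only [pvAdj]
  rw [← List.map_tail, List.zip_map]
  rfl

lemma pvAdj_length {α : Type} (l : List α) : (pvAdj l).length = l.length - 1 := by
  simp [pvAdj, List.length_zip]

lemma pvAdj_getElem {α : Type} (l : List α) (k : Nat) (h : k < (pvAdj l).length) :
    (pvAdj l)[k] = (l[k]'(by rw [pvAdj_length] at h; omega),
                    l[k+1]'(by rw [pvAdj_length] at h; omega)) := by
  have h' := h
  rw [pvAdj_length] at h'
  simp [pvAdj, List.getElem_zip, List.getElem_tail]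

lemma pvDigitNe {c : Char} (h : PySem.Chars.strIsdigit [c] = true) : (c == '=') = false := by
  by_cases hc : c = '='
  · exfalso; rw [hc] at h; exact absurd h (by decide)
  · simp [hc]

lemma pvSliceCount (cs : List Char) (i j : Nat) (hij : i < j) (hj : j < cs.length)
    (hd : (cs[j]'hj == '=') = false) :
    pvFindEqualCount (PySem.List.slice cs (some (i : Int)) (some ((j : Int) + 1)))
        (PySem.List.slice cs (some (i : Int)) (some ((j : Int) + 1))).length 0 =
      pvCnt (cs.take j) - pvCnt (cs.take i) := by
  have hcast : (j : Int) + 1 = ((j + 1 : Nat) : Int) := by push_cast; ring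
  rw [hcast, PySem.List.slice_natCast]
  rw [pvFindEqualCount_eq _ 0 (Nat.zero_le _)]
  simp only [List.drop_zero]
  have hsum : i + (j + 1 - i) = j + 1 := by omega
  have htake : cs.take (j+1) = cs.take i ++ (cs.drop i).take (j + 1 - i) := by
    rw [← hsum, List.take_add]
    simp
  have hcnt : (cs.take (j+1)).countP (· == '=') =
      (cs.take i).countP (· == '=') + ((cs.drop i).take (j + 1 - i)).countP (· == '=') := by
    rw [htake, List.countP_append]
  have htake1 : cs.take (j+1) = cs.take j ++ [cs[j]] := by
    rw [List.take_add_one, List.getElem?_eq_getElem hj]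
    rfl
  have hcnt2 : (cs.take (j+1)).countP (· == '=') = (cs.take j).countP (· == '=') := by
    rw [htake1, List.countP_append]
    simp [hd]
  simp only [pvCnt]
  omega

lemma pvMemAdj {α : Type} (l : List α) (q : α × α) :
    q ∈ pvAdj l ↔ ∃ (k : Nat) (h : k + 1 < l.length),
      q = (l[k]'(by omega), l[k+1]'h) := by
  constructor
  · intro hq
    obtain ⟨k, hk, hget⟩ := List.mem_iff_getElem.mp hq
    have hk' : k + 1 < l.length := by
      have := hk; rw [pvAdj_length] at this; omega
    refine ⟨k, hk', ?_⟩
    rw [← hget, pvAdj_getElem]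
  · rintro ⟨k, hk, rfl⟩
    apply List.mem_iff_getElem.mpr
    have hk2 : k < (pvAdj l).length := by rw [pvAdj_length]; omega
    exact ⟨k, hk2, by rw [pvAdj_getElem]⟩

-- membership in A's pair set, phrased over the adjacent pairs of the digit list
lemma pvMemS (ds : List (Nat × Int × Int)) (hds : ds ≠ []) (x : Int × Int) :
    (x ∈ pvFindPairTen (ds.map (fun y => ((y.1 : Int), y.2.1)))
        ((ds.map (fun y => ((y.1 : Int), y.2.1))).length - 1) PySem.Set.empty) ↔
      ∃ q ∈ pvAdj ds, q.2.2.1 + q.1.2.1 = 10 ∧ x = ((q.1.1 : Int), (q.2.1 : Int)) := by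
  set l := ds.map (fun y => ((y.1 : Int), y.2.1)) with hl
  have hlen : l.length = ds.length := by simp [hl]
  have hgetl : ∀ (k : Nat) (h : k < ds.length), l.getD k (0,0) = ((ds[k].1 : Int), ds[k].2.1) := by
    intro k h
    rw [List.getD_eq_getElem l (0,0) (by omega : k < l.length)]
    simp [hl]
  rw [pvMemFindPairTen]
  simp only [PySem.Set.empty]
  constructor
  · rintro (hmem | ⟨k, hk, hsum, hx⟩)
    · simp at hmem
    · have hk1 : k + 1 < ds.length := by omega
      have hk0 : k < ds.length := by omega
      refine ⟨(ds[k]'hk0, ds[k+1]'hk1), (pvMemAdj ds _).mpr ⟨k, hk1, rfl⟩, ?_, ?_⟩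
      · rw [hgetl k hk0, hgetl (k+1) hk1] at hsum
        exact hsum
      · rw [hgetl k hk0, hgetl (k+1) hk1] at hx
        exact hx
  · rintro ⟨q, hq, hsum, hx⟩
    obtain ⟨k, hk1, rfl⟩ := (pvMemAdj ds q).mp hq
    refine Or.inr ⟨k, by omega, ?_, ?_⟩
    · rw [hgetl k (by omega), hgetl (k+1) hk1]
      exact hsum
    · rw [hgetl k (by omega), hgetl (k+1) hk1]
      exact hx

lemma pvHasTen_eq (ds : List (Nat × Int × Int)) :
    pvHasTen (ds.map (·.2)) = (pvAdj ds).any (fun q => q.1.2.1 + q.2.2.1 == 10) := by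
  rw [pvHasTen, pvAdj_map, List.any_map]
  rfl

lemma pvAllOk_eq (ds : List (Nat × Int × Int)) :
    pvAllOk (ds.map (·.2)) =
      (pvAdj ds).all (fun q => !(q.1.2.1 + q.2.2.1 == 10) || (q.2.2.2 - q.1.2.2 == 3)) := by
  rw [pvAllOk, pvAdj_map, List.all_map]
  rfl

-- the condition A checks for one pair equals the condition B checks, for adjacent digits
lemma pvCond_eq (cs : List Char) (q : (Nat × Int × Int) × (Nat × Int × Int))
    (hq : q ∈ pvAdj (pvDigsI cs 0 0)) :
    (pvFindEqualCount (PySem.List.slice cs (some (q.1.1 : Int)) (some ((q.2.1 : Int) + 1)))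
        (PySem.List.slice cs (some (q.1.1 : Int)) (some ((q.2.1 : Int) + 1))).length 0 == 3) =
      (q.2.2.2 - q.1.2.2 == 3) := by
  have hij : q.1.1 < q.2.1 := pvAdj_of_pairwise (pvDigsI_pairwise cs 0 0) hq
  have hzip : q.1 ∈ pvDigsI cs 0 0 ∧ q.2 ∈ (pvDigsI cs 0 0).tail := by
    have hq' : (q.1, q.2) ∈ (pvDigsI cs 0 0).zip (pvDigsI cs 0 0).tail := by
      rw [← pvAdj]; exact hq
    exact List.of_mem_zip hq'
  have hmem2 : q.2 ∈ pvDigsI cs 0 0 := List.mem_of_mem_tail hzip.2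
  have hmem1 : q.1 ∈ pvDigsI cs 0 0 := hzip.1
  obtain ⟨_, hb2, hcnt2, c2, hget2, hdig2⟩ := pvDigsI_mem cs 0 0 q.2 hmem2
  obtain ⟨_, _, hcnt1, _, _, _⟩ := pvDigsI_mem cs 0 0 q.1 hmem1
  simp only [Nat.sub_zero, Nat.zero_add, zero_add] at hb2 hcnt2 hcnt1 hget2
  have hj : q.2.1 < cs.length := by omega
  have hc2 : cs[q.2.1]'hj = c2 := by
    have := List.getElem?_eq_getElem hj
    rw [this] at hget2
    exact (Option.some.injEq _ _).mp hget2.symm |>.symm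
  have hd : (cs[q.2.1]'hj == '=') = false := by rw [hc2]; exact pvDigitNe hdig2
  rw [pvSliceCount cs q.1.1 q.2.1 hij hj hd, ← hcnt1, ← hcnt2]

lemma pvA_char (village : String) :
    white_walkers village =
      if village.toList.length < 5 then false
      else pvHasTen (pvDV village.toList 0) && pvAllOk (pvDV village.toList 0) := by
  simp only [white_walkers]
  by_cases h5 : village.toList.length < 5
  · simp only [if_pos h5]
  · simp only [if_neg h5]
    set cs := village.toList with hcs
    have hII : ((PySem.List.enumerate cs 0).filter (fun kv => PySem.Chars.strIsdigit [kv.2])).map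
        (fun kv => (kv.1, pvIntChar kv.2)) =
        (pvDigsI cs 0 0).map (fun y => ((y.1 : Int), y.2.1)) := by
      simpa using pvIntIndexes cs 0 0
    rw [hII]
    set ds := pvDigsI cs 0 0 with hds
    have hDVds : pvDV cs 0 = ds.map (·.2) := rfl
    rcases List.eq_nil_or_concat ds with hnil | ⟨_, _, hne⟩
    · rw [hnil]
      simp [pvHasTen, pvAdj, pvDV, ← hds, hnil]
    · have hdsne : ds ≠ [] := by rw [hne]; simp
      have hlen : (ds.map (fun y => ((y.1 : Int), y.2.1))).length ≠ 0 := by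
        simp [hdsne]
      rw [if_neg hlen]
      set S := pvFindPairTen (ds.map (fun y => ((y.1 : Int), y.2.1)))
        ((ds.map (fun y => ((y.1 : Int), y.2.1))).length - 1) PySem.Set.empty with hS
      have hmemS := pvMemS ds hdsne
      by_cases hE : S.isEmpty
      · rw [if_pos hE]
        have hSnil : S = [] := List.isEmpty_iff.mp hE
        have hnoten : pvHasTen (pvDV cs 0) = false := by
          rw [hDVds, pvHasTen_eq]
          apply List.any_eq_false.mpr
          intro q hq
          by_cases hsum : q.1.2.1 + q.2.2.1 = 10
          · exfalso
            have : ((q.1.1 : Int), (q.2.1 : Int)) ∈ S :=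
              (hmemS _).mpr ⟨q, hq, by omega, rfl⟩
            rw [hSnil] at this
            simp at this
          · simp [hsum]
        rw [hnoten, Bool.false_and]
      · rw [if_neg hE]
        have hten : pvHasTen (pvDV cs 0) = true := by
          rw [hDVds, pvHasTen_eq]
          have : S ≠ [] := by
            intro h; rw [h] at hE; exact hE (by simp)
          obtain ⟨x, hx⟩ := List.exists_mem_of_ne_nil S this
          obtain ⟨q, hq, hsum, _⟩ := (hmemS x).mp hx
          exact List.any_eq_true.mpr ⟨q, hq, by simp; omega⟩
        rw [hten, Bool.true_and]
        rcases Bool.eq_false_or_eq_true (pvAllOk (pvDV cs 0)) with hAO | hAO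
        · rw [hAO]
          rw [hDVds, pvAllOk_eq] at hAO
          apply List.all_eq_true.mpr
          intro x hxS
          obtain ⟨q, hq, hsum, hx⟩ := (hmemS x).mp hxS
          have hball := List.all_eq_true.mp hAO q hq
          rw [hx]
          simp only
          rw [pvCond_eq cs q hq]
          rcases Bool.eq_false_or_eq_true (q.1.2.1 + q.2.2.1 == 10) with h10 | h10
          · rw [h10] at hball
            simpa using hball
          · exfalso; rw [beq_eq_false_iff_ne] at h10; omega
        · rw [hAO]
          rw [hDVds, pvAllOk_eq] at hAO
          obtain ⟨q, hq, hcond⟩ := List.all_eq_false.mp hAO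
          have h10 : (q.1.2.1 + q.2.2.1 == 10) = true ∧ (q.2.2.2 - q.1.2.2 == 3) = false := by
            rcases Bool.eq_false_or_eq_true (q.1.2.1 + q.2.2.1 == 10) with h | h
            · refine ⟨h, ?_⟩
              rcases Bool.eq_false_or_eq_true (q.2.2.2 - q.1.2.2 == 3) with h3 | h3
              · exact absurd (by simp [h3]) hcond
              · exact h3
            · exfalso; exact hcond (by simp [h])
          apply List.all_eq_false.mpr
          refine ⟨((q.1.1 : Int), (q.2.1 : Int)), (hmemS _).mpr ⟨q, hq, ?_, rfl⟩, ?_⟩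
          · have := h10.1; rw [beq_iff_eq] at this; omega
          · simp only
            rw [pvCond_eq cs q hq, h10.2]
            simp

-- ===== VERDICT (by name: the statement is the Claim_ definition above) =====
theorem white_walkers_spec : Claim_equal_white_walkers := by
  intro village _
  unfold Spec_white_walkers
  rw [pvA_char, pvB_char]
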